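-- pv_equiv track=rewrite | github.com/98coco/cs30_fall2022 | comp sci discussions/ps10.py | qLoop
-- ===== SOURCE A (Python) =====
-- def qLoop(l):
--     res = False
--     for x in l:
--             if x >= 10 and x <= 100:
--                 if x%2 == 1:
--                    res = False
--                 else:
--                     res = True
--             else:
--                 res
--     return res
-- ===== SOURCE B (Python) =====
-- def qLoop(l):
--     vals = [x for x in l if 10 <= x <= 100]
--     if not vals:
--         return False
--     return vals[-1] % 2 != 1
-- ===== Notes on version B (the rewrite author's own statement) =====
-- stated objective: simpler
-- what changed: Instead of tracking a boolean flag mutated across the whole loop, B filters the in-range elements once and examines only the last one, returning False when none exist.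
import Mathlib
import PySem

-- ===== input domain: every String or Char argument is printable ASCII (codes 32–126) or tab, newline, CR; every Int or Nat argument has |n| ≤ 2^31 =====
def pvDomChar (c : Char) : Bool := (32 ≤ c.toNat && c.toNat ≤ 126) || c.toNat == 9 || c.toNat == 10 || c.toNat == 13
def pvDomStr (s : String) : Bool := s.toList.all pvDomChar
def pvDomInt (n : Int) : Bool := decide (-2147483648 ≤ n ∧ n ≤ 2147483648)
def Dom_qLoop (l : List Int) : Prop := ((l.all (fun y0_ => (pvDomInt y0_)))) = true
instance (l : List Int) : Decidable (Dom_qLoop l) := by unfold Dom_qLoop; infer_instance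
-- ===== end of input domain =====

-- B keeps only the in-range elements and looks at the last one, instead of A's mutated flag; return values agree on all inputs.
-- ===== PORT A =====
def qLoop (l : List Int) : Bool :=
  l.foldl (fun res x =>
    if 10 ≤ x ∧ x ≤ 100 then
      if x % 2 == 1 then false else true
    else res) false

-- ===== PORT B =====
def qLoop_alt (l : List Int) : Bool :=
  let vals := l.filter (fun x => 10 ≤ x && x ≤ 100)
  match vals.getLast? with
  | none => false
  | some v => v % 2 != 1

-- ===== PRECONDITION & SPEC =====
def Spec_qLoop (l : List Int) (out : Bool) : Prop := out = qLoop_alt l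
instance (l : List Int) (out : Bool) : Decidable (Spec_qLoop l out) := by unfold Spec_qLoop; infer_instance

-- ===== CLAIM (what is proved, stated in full; the proofs are below) =====
def Claim_equal_qLoop : Prop := ∀ (l : List Int), Dom_qLoop l → Spec_qLoop l (qLoop l)

-- ===== LEMMAS AND PROOFS =====
theorem qLoop_fold_eq (l : List Int) (res : Bool) :
    l.foldl (fun res x =>
      if 10 ≤ x ∧ x ≤ 100 then
        if x % 2 == 1 then false else true
      else res) res
    = match (l.filter (fun x => 10 ≤ x && x ≤ 100)).getLast? with
      | none => res
      | some v => v % 2 != 1 := by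
  induction l generalizing res with
  | nil => simp
  | cons a t ih =>
    simp only [List.foldl_cons, List.filter_cons]
    by_cases h : 10 ≤ a ∧ a ≤ 100
    · simp only [h.1, h.2, and_self, if_true, decide_true, Bool.and_self]
      rw [ih]
      cases hf : (t.filter (fun x => 10 ≤ x && x ≤ 100)).getLast? with
      | none =>
        simp [List.getLast?_cons, List.getLast?_eq_none_iff.mp hf]
        by_cases hm : a % 2 = 1 <;> simp [hm]
      | some v =>
        have : ((a :: t.filter (fun x => 10 ≤ x && x ≤ 100)).getLast?) = some v := by
          cases hfe : t.filter (fun x => 10 ≤ x && x ≤ 100) with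
          | nil => rw [hfe] at hf; simp at hf
          | cons b u =>
            rw [hfe] at hf
            simp [List.getLast?_cons_cons, hf]
        simp [this]
    · have hb : (decide (10 ≤ a) && decide (a ≤ 100)) = false := by
        rcases not_and_or.mp h with h1 | h1 <;> simp [h1]
      rw [if_neg h, if_neg (by simp [hb])]
      exact ih res

-- ===== VERDICT (by name: the statement is the Claim_ definition above) =====
theorem qLoop_spec : Claim_equal_qLoop := by
  intro l _
  unfold Spec_qLoop qLoop qLoop_alt
  exact qLoop_fold_eq l false
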